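-- pv_equiv track=rewrite | github.com/Lenir/TIL | Online Judge/CodingTest/zum01.py | countStrokes
-- ===== SOURCE A (Python) =====
-- def countStrokes(A:list):
--     strokeSum = 0
--     lastHeight = 0
--     for skyLine in A:
--         heightDiff = skyLine - lastHeight
--         if heightDiff > 0:
--             strokeSum += heightDiff
--         lastHeight = skyLine
--         if strokeSum > 1000000000:
--             raise MaximumHeightExceeds
--     return strokeSum
--
-- class MaximumHeightExceeds(Exception):
--     pass
-- ===== SOURCE B (Python) =====
-- class MaximumHeightExceeds(Exception):
--     pass
--
-- def countStrokes(A: list):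
--     # Peak-valley method over the sequence [0] + A: each maximal ascending run
--     # contributes (peak - valley); non-increasing steps contribute nothing.
--     H = [0] + A
--     n = len(H)
--     total = 0
--     i = 0
--     while i < n:
--         while i + 1 < n and H[i + 1] <= H[i]:
--             i += 1
--         valley = H[i]
--         while i + 1 < n and H[i + 1] > H[i]:
--             i += 1
--         total += H[i] - valley
--         i += 1
--     if total > 1000000000:
--         raise MaximumHeightExceeds
--     return total
-- ===== Notes on version B (the rewrite author's own statement) =====
-- stated objective: alternative
-- what changed: B replaces A's per-element running last-height diff accumulation with a peak-valley scan over [0]+A: an index pointer skips each non-increasing run to a valley, then each increasing run to a peak, adding peak-valley per ascending run.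
import Mathlib
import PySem

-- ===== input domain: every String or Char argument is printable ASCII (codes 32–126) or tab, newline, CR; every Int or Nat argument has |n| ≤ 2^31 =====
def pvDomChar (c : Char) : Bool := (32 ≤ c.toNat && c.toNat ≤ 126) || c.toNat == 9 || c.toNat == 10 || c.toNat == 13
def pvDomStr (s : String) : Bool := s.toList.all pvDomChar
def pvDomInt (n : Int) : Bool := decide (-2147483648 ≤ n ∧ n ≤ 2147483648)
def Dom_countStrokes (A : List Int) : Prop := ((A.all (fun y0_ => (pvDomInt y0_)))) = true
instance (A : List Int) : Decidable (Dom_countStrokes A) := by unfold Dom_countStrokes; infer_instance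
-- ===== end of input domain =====

-- B computes the same stroke total by a peak-valley scan over [0]+A instead of A's
-- running last-height positive-diff accumulation (objective: alternative decomposition).

-- ===== PORT A =====
-- A's for-loop carries (strokeSum, lastHeight); the raise path (strokeSum > 10^9,
-- strokeSum is non-decreasing so this happens iff the final sum exceeds 10^9) is
-- excluded by Pre_countStrokes below.
def countStrokes (A : List Int) : Int :=
  (A.foldl (fun (st : Int × Int) skyLine =>
      let heightDiff := skyLine - st.2
      let strokeSum := if heightDiff > 0 then st.1 + heightDiff else st.1
      (strokeSum, skyLine)) (0, 0)).1

-- ===== PORT B =====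
-- inner while: advance past non-increasing steps (to a valley)
def bDescend (H : List Int) (i : Nat) : Nat :=
  if i + 1 < H.length ∧ H[i+1]! ≤ H[i]! then
    bDescend H (i + 1)
  else i
termination_by H.length - i

-- inner while: advance past increasing steps (to a peak)
def bAscend (H : List Int) (i : Nat) : Nat :=
  if i + 1 < H.length ∧ H[i]! < H[i+1]! then
    bAscend H (i + 1)
  else i
termination_by H.length - i

theorem bDescend_ge (H : List Int) (i : Nat) : i ≤ bDescend H i := by
  rw [bDescend]; split
  · exact Nat.le_of_succ_le (bDescend_ge H (i + 1))
  · exact Nat.le_refl i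
termination_by H.length - i

theorem bAscend_ge (H : List Int) (i : Nat) : i ≤ bAscend H i := by
  rw [bAscend]; split
  · exact Nat.le_of_succ_le (bAscend_ge H (i + 1))
  · exact Nat.le_refl i
termination_by H.length - i

-- outer while: one ascending run per iteration
def bLoop (H : List Int) (i : Nat) (total : Int) : Int :=
  if h : i < H.length then
    let j := bDescend H i
    let valley := H[j]!
    let k := bAscend H j
    bLoop H (k + 1) (total + (H[k]! - valley))
  else total
termination_by H.length - i
decreasing_by
  have h1 := bDescend_ge H i
  have h2 := bAscend_ge H (bDescend H i)
  omega

-- the raise path (total > 10^9) is excluded by Pre_countStrokes below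
def countStrokes_alt (A : List Int) : Int :=
  bLoop (0 :: A) 0 0

-- ===== PRECONDITION & SPEC =====
-- The sum of positive consecutive rises (baseline 0), used only to state when A returns.
def posRise (A : List Int) : Int :=
  (((0 :: A).zipWith (fun a b => max (b - a) 0) A)).sum

-- Pre_ excludes exactly the inputs on which the Python A raises MaximumHeightExceeds:
-- A's accumulator is non-decreasing, so A raises iff the final stroke sum exceeds 10^9.
def Pre_countStrokes (A : List Int) : Prop := posRise A ≤ 1000000000
instance (A : List Int) : Decidable (Pre_countStrokes A) := by unfold Pre_countStrokes; infer_instance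
def pvWitness_countStrokes : List Int := [1, 3, 2, 4]

def Spec_countStrokes (A : List Int) (out : Int) : Prop := out = countStrokes_alt A
instance (A : List Int) (out : Int) : Decidable (Spec_countStrokes A out) := by unfold Spec_countStrokes; infer_instance

-- ===== CLAIM (what is proved, stated in full; the proofs are below) =====
def Claim_equal_countStrokes : Prop := ∀ (A : List Int), Dom_countStrokes A → Pre_countStrokes A → Spec_countStrokes A (countStrokes A)

-- ===== LEMMAS AND PROOFS =====

-- the mathematical core: sum of positive diffs against a running last height
def aLoop : Int → List Int → Int
  | _, [] => 0
  | last, x :: xs => (if x - last > 0 then x - last else 0) + aLoop x xs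

theorem countStrokes_eq_aLoop_aux (A : List Int) (s last : Int) :
    (A.foldl (fun (st : Int × Int) skyLine =>
      let heightDiff := skyLine - st.2
      let strokeSum := if heightDiff > 0 then st.1 + heightDiff else st.1
      (strokeSum, skyLine)) (s, last)).1 = s + aLoop last A := by
  induction A generalizing s last with
  | nil => simp [aLoop]
  | cons x xs ih =>
    simp only [List.foldl_cons, aLoop]
    rw [ih]
    split <;> ring

theorem countStrokes_eq_aLoop (A : List Int) : countStrokes A = aLoop 0 A := by
  have := countStrokes_eq_aLoop_aux A 0 0
  simpa [countStrokes] using this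

theorem drop_succ_eq_cons (H : List Int) (i : Nat) (h : i + 1 < H.length) :
    H.drop (i + 1) = H[i+1]! :: H.drop (i + 2) := by
  rw [List.drop_eq_getElem_cons h, getElem!_pos H _ h]

theorem bDescend_lt (H : List Int) (i : Nat) (h : i < H.length) : bDescend H i < H.length := by
  rw [bDescend]; split
  · rename_i hs
    exact bDescend_lt H (i + 1) hs.1
  · exact h
termination_by H.length - i

theorem bAscend_lt (H : List Int) (i : Nat) (h : i < H.length) : bAscend H i < H.length := by
  rw [bAscend]; split
  · rename_i hs
    exact bAscend_lt H (i + 1) hs.1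
  · exact h
termination_by H.length - i

-- descending run contributes nothing to aLoop
theorem descend_aLoop (H : List Int) (i : Nat) (h : i < H.length) :
    aLoop (H[i]!) (H.drop (i + 1)) =
      aLoop (H[bDescend H i]!) (H.drop (bDescend H i + 1)) := by
  rw [bDescend]; split
  · rename_i hs
    rw [drop_succ_eq_cons H i hs.1]
    simp only [aLoop]
    have hle : ¬ (H[i+1]! - H[i]! > 0) := by have := hs.2; omega
    rw [if_neg hle]
    have := descend_aLoop H (i + 1) hs.1
    simpa using this
  · rfl
termination_by H.length - i

-- ascending run telescopes to peak - valley
theorem ascend_aLoop (H : List Int) (i : Nat) (h : i < H.length) :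
    aLoop (H[i]!) (H.drop (i + 1)) =
      (H[bAscend H i]! - H[i]!) +
        aLoop (H[bAscend H i]!) (H.drop (bAscend H i + 1)) := by
  rw [bAscend]; split
  · rename_i hs
    rw [drop_succ_eq_cons H i hs.1]
    simp only [aLoop]
    have hpos : H[i+1]! - H[i]! > 0 := by have := hs.2; omega
    rw [if_pos hpos]
    rw [ascend_aLoop H (i + 1) hs.1]; ring
  · simp
termination_by H.length - i

-- stop condition of bAscend
theorem bAscend_stop (H : List Int) (i : Nat) :
    ¬ (bAscend H i + 1 < H.length ∧ H[bAscend H i]! < H[bAscend H i + 1]!) := by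
  rw [bAscend]; split
  · exact bAscend_stop H (i + 1)
  · rename_i hs
    exact hs
termination_by H.length - i

theorem bLoop_eq (H : List Int) (i : Nat) (total : Int) :
    bLoop H i total =
      total + (if i < H.length then aLoop (H[i]!) (H.drop (i + 1)) else 0) := by
  rw [bLoop]
  by_cases h : i < H.length
  · rw [dif_pos h, if_pos h]
    have hj : bDescend H i < H.length := bDescend_lt H i h
    have hk : bAscend H (bDescend H i) < H.length := bAscend_lt H (bDescend H i) hj
    rw [bLoop_eq H (bAscend H (bDescend H i) + 1)
      (total + (H[bAscend H (bDescend H i)]! - H[bDescend H i]!))]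
    rw [descend_aLoop H i h, ascend_aLoop H (bDescend H i) hj]
    set k := bAscend H (bDescend H i) with hkdef
    by_cases hk1 : k + 1 < H.length
    · rw [if_pos hk1, drop_succ_eq_cons H k hk1]
      simp only [aLoop]
      have hstop := bAscend_stop H (bDescend H i)
      rw [← hkdef] at hstop
      have hle : ¬ (H[k+1]! - H[k]! > 0) := by
        intro hc
        exact hstop ⟨hk1, by omega⟩
      rw [if_neg hle]
      ring
    · rw [if_neg hk1]
      have hnil : H.drop (k + 1) = [] := List.drop_eq_nil_of_le (by omega)
      rw [hnil]
      simp [aLoop]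
  · rw [dif_neg h, if_neg h]; ring
termination_by H.length - i
decreasing_by
  have h1 := bDescend_ge H i
  have h2 := bAscend_ge H (bDescend H i)
  omega

theorem alt_eq_aLoop (A : List Int) : countStrokes_alt A = aLoop 0 A := by
  unfold countStrokes_alt
  rw [bLoop_eq]
  have h0 : 0 < (0 :: A).length := by simp
  rw [if_pos h0]
  simp [aLoop]

-- ===== VERDICT (by name: the statement is the Claim_ definition above) =====
theorem countStrokes_spec : Claim_equal_countStrokes := by
  intro A _ _
  unfold Spec_countStrokes
  rw [countStrokes_eq_aLoop, alt_eq_aLoop]
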